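-- pv_equiv track=rewrite | github.com/vandermort/vander | tests/test_separation.py | k_hot_to_alternating
-- ===== SOURCE A (Python) =====
-- def k_hot_to_alternating(sv, N):
--     dense = [0,] * N
--     for s in sv:
--         dense[s] = 1
--
--     alt = [1]
--     for s in dense:
--         if s:
--             alt.append(-alt[-1])
--         else:
--             alt.append(alt[-1])
--     alt = [i for i, v in enumerate(alt) if v > 0]
--     return alt
-- ===== SOURCE B (Python) =====
-- def k_hot_to_alternating(sv, N):
--     member = [False] * N
--     for s in sv:
--         member[s] = True
--     flips = [i for i, m in enumerate(member) if m]
--     out = []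
--     lo = 0
--     even = True
--     for p in flips:
--         if even:
--             out.extend(range(lo, p + 1))
--         lo = p + 1
--         even = not even
--     if even:
--         out.extend(range(lo, N + 1))
--     return out
-- ===== Notes on version B (the rewrite author's own statement) =====
-- stated objective: alternative
-- what changed: Instead of tracking a running sign in a growing alt array and filtering its enumeration, B builds a boolean membership array, extracts the sorted flip positions, and emits the result as contiguous ranges between alternate flip points.
-- outside the precondition, e.g. on k_hot_to_alternating([], -1): A returns [0], B returns []
import Mathlib
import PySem

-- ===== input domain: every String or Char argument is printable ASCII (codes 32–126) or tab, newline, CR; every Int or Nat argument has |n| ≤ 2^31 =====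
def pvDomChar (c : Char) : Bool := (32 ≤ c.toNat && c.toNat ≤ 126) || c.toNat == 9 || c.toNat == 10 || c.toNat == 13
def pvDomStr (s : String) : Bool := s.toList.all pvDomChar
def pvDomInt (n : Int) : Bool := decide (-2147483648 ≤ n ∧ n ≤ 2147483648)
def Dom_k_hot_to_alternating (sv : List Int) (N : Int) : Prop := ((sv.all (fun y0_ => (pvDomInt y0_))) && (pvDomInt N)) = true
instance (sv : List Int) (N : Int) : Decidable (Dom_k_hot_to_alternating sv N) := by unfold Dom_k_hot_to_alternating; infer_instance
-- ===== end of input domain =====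

-- B replaces A's running-sign array + enumerate/filter with a boolean membership array whose flip
-- positions are emitted as alternating contiguous ranges (objective: alternative decomposition).


-- ===== PORT A =====
-- literal port of A.  The growing Python list alt is kept as an Array (Python append / alt[-1]
-- are O(1); alt[-1] is back?.getD 0 — exact, since alt starts as [1] and only grows, so Python's
-- alt[-1] never raises).  The comprehension [i for i, v in enumerate(alt) if v > 0] is ported by
-- hand as the same left-to-right traversal carrying the running index and an Array accumulator —
-- exact: same elements, same order.
def k_hot_to_alternating (sv : List Int) (N : Int) : List Int :=
  let dense0 := PySem.List.pyRepeat [(0 : Int)] N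
  let dense := sv.foldl (fun d s => PySem.List.pySetD d s 1) dense0
  let alt := dense.foldl (fun (alt : Array Int) s =>
      if s ≠ 0 then alt.push (-(alt.back?.getD 0))
      else alt.push (alt.back?.getD 0)) #[(1 : Int)]
  ((alt.foldl (fun (st : Array Int × Int) (v : Int) => match st with
      | (out, i) => (if 0 < v then out.push i else out, i + 1)) (#[], 0)).1).toList

-- ===== PORT B =====
-- literal port of B (Source B): membership array, flip positions, range emission between flips.
-- The comprehension [i for i, m in enumerate(member) if m] and out.extend(range(...)) are ported
-- by hand with Array accumulators (same traversal, same elements, same order — exact).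
def k_hot_to_alternating_alt (sv : List Int) (N : Int) : List Int :=
  let member0 := PySem.List.pyRepeat [false] N
  let member := sv.foldl (fun m s => PySem.List.pySetD m s true) member0
  let flips := ((member.foldl (fun (st : Array Int × Int) m => match st with
      | (out, i) => (if m then out.push i else out, i + 1)) (#[], 0)).1).toList
  let st := flips.foldl (fun (st : Array Int × Int × Bool) p => match st with
      | (out, lo, even) =>
        (if even then (PySem.List.pyRange lo (p + 1) 1).foldl Array.push out else out,
         p + 1, !even)) (#[], 0, true)
  (if st.2.2 then (PySem.List.pyRange st.2.1 (N + 1) 1).foldl Array.push st.1 else st.1).toList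

-- ===== PRECONDITION & SPEC =====
-- Pre_ restricts to the natural domain of the task: a non-negative count N (for negative N
-- Python's [0]*N is empty, so A raises IndexError on any nonempty sv, and on sv = [] its value
-- [0] is outside the task's natural domain and is not claimed), and every index of sv in range
-- of the length-N array (otherwise A's assignment dense[s] = 1 raises IndexError).
def Pre_k_hot_to_alternating (sv : List Int) (N : Int) : Prop :=
  0 ≤ N ∧ ∀ s ∈ sv, PySem.Raise.InRange N.toNat s
instance (sv : List Int) (N : Int) : Decidable (Pre_k_hot_to_alternating sv N) := by
  unfold Pre_k_hot_to_alternating; infer_instance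
def pvWitness_k_hot_to_alternating : List Int × Int := ([0, -1, 2], 4)

def Spec_k_hot_to_alternating (sv : List Int) (N : Int) (out : List Int) : Prop := out = k_hot_to_alternating_alt sv N
instance (sv : List Int) (N : Int) (out : List Int) : Decidable (Spec_k_hot_to_alternating sv N out) := by unfold Spec_k_hot_to_alternating; infer_instance

-- ===== CLAIM (what is proved, stated in full; the proofs are below) =====
def Claim_equal_k_hot_to_alternating : Prop := ∀ (sv : List Int) (N : Int), Dom_k_hot_to_alternating sv N → Pre_k_hot_to_alternating sv N → Spec_k_hot_to_alternating sv N (k_hot_to_alternating sv N)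

-- ===== LEMMAS AND PROOFS =====

-- the common abstraction: positions i..i+len d whose running flip-parity (starting 'even') is even
def altIdx : List Bool → Int → Bool → List Int
  | [], i, even => if even then [i] else []
  | b :: rest, i, even => (if even then [i] else []) ++ altIdx rest (i + 1) (if b then !even else even)

-- pySetD commutes with map (indexing depends only on the length)
theorem map_pySetD {α β : Type} (f : α → β) (xs : List α) (i : Int) (v : α) :
    (PySem.List.pySetD xs i v).map f = PySem.List.pySetD (xs.map f) i (f v) := by
  simp only [PySem.List.pySetD, PySem.List.pySet?, List.length_map]
  cases PySem.List.pyIdx? xs.length i with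
  | none => rfl
  | some k => simp [List.map_set]

theorem length_foldl_pySetD {α : Type} (sv : List Int) (xs : List α) (v : α) :
    (sv.foldl (fun d s => PySem.List.pySetD d s v) xs).length = xs.length := by
  induction sv generalizing xs with
  | nil => rfl
  | cons s sv ih => simp [ih, PySem.List.length_pySetD]

-- the two membership arrays agree: member = dense.map (· ≠ 0)
theorem member_eq_map_dense (sv : List Int) (xs : List Int) :
    sv.foldl (fun m s => PySem.List.pySetD m s true) (xs.map (fun x => decide (x ≠ 0)))
      = (sv.foldl (fun d s => PySem.List.pySetD d s 1) xs).map (fun x => decide (x ≠ 0)) := by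
  induction sv generalizing xs with
  | nil => rfl
  | cons s sv ih =>
      simp only [List.foldl_cons]
      rw [← ih, map_pySetD]
      norm_num

-- appending a list to an Array by repeated push
theorem foldl_push_toList {α : Type} (l : List α) (a : Array α) :
    (l.foldl Array.push a).toList = a.toList ++ l := by
  induction l generalizing a with
  | nil => simp
  | cons x l ih => simp

-- the hand-ported '[st.2 for v in xs if p v]' fold is the enumerate/filter/map comprehension
theorem foldl_enumFilter {α : Type} (p : α → Bool) (xs : List α) (acc : Array Int) (i : Int) :
    ((xs.foldl (fun (st : Array Int × Int) v => match st with
        | (out, j) => (if p v then out.push j else out, j + 1)) (acc, i)).1).toList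
      = acc.toList ++ ((PySem.List.enumerate xs i).filter (fun q => p q.2)).map (fun q => q.1) := by
  induction xs generalizing acc i with
  | nil => simp [PySem.List.enumerate_nil]
  | cons v xs ih =>
      simp only [List.foldl_cons, PySem.List.enumerate_cons, List.filter_cons]
      by_cases h : p v = true
      · rw [if_pos h, ih]
        simp [h]
      · rw [if_neg h, ih]
        simp [h]

-- ---- A side ----

def posIdx (xs : List Int) : List Int :=
  ((PySem.List.enumerate xs 0).filter (fun p => decide (0 < p.2))).map (fun p => p.1)

def stepA (alt : List Int) (s : Int) : List Int :=
  if s ≠ 0 then alt ++ [-(alt.getLast?.getD 0)]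
  else alt ++ [alt.getLast?.getD 0]

-- the Array accumulator of port A, seen through toList, is the list-level stepA fold
theorem arrayFold_toList (d : List Int) (arr : Array Int) :
    (d.foldl (fun (alt : Array Int) s =>
        if s ≠ 0 then alt.push (-(alt.back?.getD 0))
        else alt.push (alt.back?.getD 0)) arr).toList
      = d.foldl stepA arr.toList := by
  induction d generalizing arr with
  | nil => rfl
  | cons s d ih =>
      simp only [List.foldl_cons, ih]
      congr 1
      simp only [stepA, ← Array.getLast?_toList]
      split_ifs <;> simp [Array.toList_push]

theorem posIdx_snoc (xs : List Int) (x : Int) :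
    posIdx (xs ++ [x]) = posIdx xs ++ (if 0 < x then [(xs.length : Int)] else []) := by
  simp only [posIdx, PySem.List.enumerate_append, List.filter_append, List.map_append]
  congr 1
  rw [PySem.List.enumerate_cons]
  by_cases h : 0 < x <;> simp [PySem.List.enumerate_nil, h]

theorem A_main (d : List Int) (alt : List Int) (a : Int)
    (hlast : alt.getLast? = some a) (ha : a = 1 ∨ a = -1) :
    posIdx (d.foldl stepA alt)
      = posIdx alt.dropLast ++ altIdx (d.map (fun x => decide (x ≠ 0))) ((alt.length : Int) - 1) (decide (0 < a)) := by
  induction d generalizing alt a with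
  | nil =>
      have hne : alt ≠ [] := by intro h; simp [h] at hlast
      have hga : alt.getLast hne = a := by
        rw [List.getLast?_eq_some_getLast hne] at hlast
        exact Option.some_inj.mp hlast
      have hsplit : alt.dropLast ++ [a] = alt := by
        rw [← hga]; exact List.dropLast_append_getLast hne
      have hlen : ((alt.dropLast.length : Int)) = (alt.length : Int) - 1 := by
        have h1 : alt.dropLast.length = alt.length - 1 := List.length_dropLast
        have h2 : 0 < alt.length := List.length_pos_iff.mpr hne
        omega
      simp only [List.foldl_nil, List.map_nil, altIdx]
      conv_lhs => rw [← hsplit]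
      rw [posIdx_snoc, hlen]
      by_cases h : 0 < a <;> simp [h]
  | cons s d ih =>
      have hne : alt ≠ [] := by intro h; simp [h] at hlast
      have hga : alt.getLast hne = a := by
        rw [List.getLast?_eq_some_getLast hne] at hlast
        exact Option.some_inj.mp hlast
      have hget : alt.getLast?.getD 0 = a := by rw [hlast]; rfl
      set x : Int := if s ≠ 0 then -a else a with hx
      have hstep : stepA alt s = alt ++ [x] := by
        simp only [stepA, hget, hx]; split_ifs <;> rfl
      have hx1 : x = 1 ∨ x = -1 := by
        rcases ha with h | h <;> simp only [hx, h] <;> split_ifs <;> simp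
      have hlast' : (alt ++ [x]).getLast? = some x := by simp
      simp only [List.foldl_cons, hstep]
      rw [ih (alt ++ [x]) x hlast' hx1]
      have hdrop : (alt ++ [x]).dropLast = alt := by simp
      have hlen : (((alt ++ [x]).length : Int)) - 1 = (alt.length : Int) := by simp
      rw [hdrop, hlen]
      have hsplit : alt.dropLast ++ [a] = alt := by
        rw [← hga]; exact List.dropLast_append_getLast hne
      have hlend : ((alt.dropLast.length : Int)) = (alt.length : Int) - 1 := by
        have h1 : alt.dropLast.length = alt.length - 1 := List.length_dropLast
        have h2 : 0 < alt.length := List.length_pos_iff.mpr hne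
        omega
      have hposIdx : posIdx alt = posIdx alt.dropLast ++ (if 0 < a then [(alt.length : Int) - 1] else []) := by
        conv_lhs => rw [← hsplit]
        rw [posIdx_snoc, hlend]
      rw [hposIdx]
      have hsign : decide (0 < x) = (if decide (s ≠ 0) then !(decide (0 < a)) else decide (0 < a)) := by
        rcases ha with h | h <;> subst h <;> simp only [hx] <;> by_cases hs : s = 0 <;> simp [hs]
      simp only [List.map_cons, altIdx, hsign]
      rw [List.append_assoc]
      congr 1
      by_cases h : 0 < a <;> simp [h]

-- ---- B side ----

def flipsF (m : List Bool) (i : Int) : List Int :=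
  ((PySem.List.enumerate m i).filter (fun p => p.2)).map (fun p => p.1)

theorem flipsF_nil (i : Int) : flipsF [] i = [] := rfl

theorem flipsF_cons_true (m : List Bool) (i : Int) :
    flipsF (true :: m) i = i :: flipsF m (i + 1) := by
  simp [flipsF, PySem.List.enumerate_cons]

theorem flipsF_cons_false (m : List Bool) (i : Int) :
    flipsF (false :: m) i = flipsF m (i + 1) := by
  simp [flipsF, PySem.List.enumerate_cons]

-- list-level model of port B's emission step and final flush
def stepB (st : List Int × Int × Bool) (p : Int) : List Int × Int × Bool :=
  (if st.2.2 then st.1 ++ PySem.List.pyRange st.2.1 (p + 1) 1 else st.1, p + 1, !st.2.2)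

def finish (st : List Int × Int × Bool) (e : Int) : List Int :=
  if st.2.2 then st.1 ++ PySem.List.pyRange st.2.1 (e + 1) 1 else st.1

-- port B's Array emission fold, seen through toList, simulates the list-level stepB fold
theorem emitFold_toList (flips : List Int) (arr : Array Int) (lo : Int) (even : Bool) :
    ((flips.foldl (fun (st : Array Int × Int × Bool) p => match st with
        | (out, lo, even) =>
          (if even then (PySem.List.pyRange lo (p + 1) 1).foldl Array.push out else out,
           p + 1, !even)) (arr, lo, even)).1).toList
      = (flips.foldl stepB (arr.toList, lo, even)).1
    ∧ (flips.foldl (fun (st : Array Int × Int × Bool) p => match st with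
        | (out, lo, even) =>
          (if even then (PySem.List.pyRange lo (p + 1) 1).foldl Array.push out else out,
           p + 1, !even)) (arr, lo, even)).2
      = (flips.foldl stepB (arr.toList, lo, even)).2 := by
  induction flips generalizing arr lo even with
  | nil => exact ⟨rfl, rfl⟩
  | cons p flips ih =>
      simp only [List.foldl_cons, stepB]
      cases even with
      | false => simpa using ih arr (p + 1) true
      | true =>
          simp only [Bool.not_true]
          have harr : ((PySem.List.pyRange lo (p + 1) 1).foldl Array.push arr).toList
              = arr.toList ++ PySem.List.pyRange lo (p + 1) 1 := foldl_push_toList _ _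
          have := ih ((PySem.List.pyRange lo (p + 1) 1).foldl Array.push arr) (p + 1) false
          rwa [harr] at this

theorem B_main (m : List Bool) (i lo : Int) (even : Bool) (out : List Int) (hlo : lo ≤ i) :
    finish ((flipsF m i).foldl stepB (out, lo, even)) (i + m.length)
      = (if even then out ++ PySem.List.pyRange lo i 1 else out) ++ altIdx m i even := by
  induction m generalizing i lo even out with
  | nil =>
      simp only [flipsF_nil, List.foldl_nil, finish, altIdx, List.length_nil,
        Int.natCast_zero, add_zero]
      have hr := PySem.List.pyRange_one_succ_right hlo
      cases even <;> simp [hr]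
  | cons b m ih =>
      have hlen : i + (((b :: m).length : Nat) : Int) = (i + 1) + ((m.length : Nat) : Int) := by
        simp; omega
      have hr : PySem.List.pyRange lo (i + 1) 1 = PySem.List.pyRange lo i 1 ++ [i] :=
        PySem.List.pyRange_one_succ_right hlo
      cases b with
      | false =>
          rw [flipsF_cons_false, hlen, ih (i + 1) lo even out (by omega)]
          simp only [altIdx]
          cases even <;> simp [hr]
      | true =>
          rw [flipsF_cons_true, hlen]
          simp only [List.foldl_cons]
          have hstep : stepB (out, lo, even) i
              = (if even then out ++ PySem.List.pyRange lo (i + 1) 1 else out, i + 1, !even) := by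
            simp [stepB]
          rw [hstep, ih (i + 1) (i + 1) (!even) _ (le_refl _)]
          have hr0 : PySem.List.pyRange (i + 1) (i + 1) 1 = [] :=
            PySem.List.pyRange_one_eq_nil (le_refl _)
          simp only [altIdx]
          cases even <;> simp [hr0, hr]

-- ===== VERDICT (by name: the statement is the Claim_ definition above) =====
theorem k_hot_to_alternating_spec : Claim_equal_k_hot_to_alternating := by
  intro sv N _hdom hpre
  obtain ⟨hN, _hin⟩ := hpre
  unfold Spec_k_hot_to_alternating k_hot_to_alternating k_hot_to_alternating_alt
  simp only []
  set dense := sv.foldl (fun d s => PySem.List.pySetD d s 1) (PySem.List.pyRepeat [(0 : Int)] N) with hdense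
  set member := sv.foldl (fun m s => PySem.List.pySetD m s true) (PySem.List.pyRepeat [false] N) with hmember
  -- member = dense.map (· ≠ 0)
  have hmem : member = dense.map (fun x => decide (x ≠ 0)) := by
    rw [hmember, hdense]
    have h0 : PySem.List.pyRepeat [false] N
        = (PySem.List.pyRepeat [(0 : Int)] N).map (fun x => decide (x ≠ 0)) := by
      simp [PySem.List.pyRepeat_singleton, List.map_replicate]
    rw [h0, member_eq_map_dense]
  have hlm : (member.length : Int) = N := by
    rw [hmember, length_foldl_pySetD]
    simp [PySem.List.pyRepeat_singleton]
    omega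
  -- A side: the port computes altIdx of the boolean view of dense
  have hA : ((dense.foldl (fun (alt : Array Int) s =>
        if s ≠ 0 then alt.push (-(alt.back?.getD 0))
        else alt.push (alt.back?.getD 0)) #[(1 : Int)]).foldl
          (fun (st : Array Int × Int) (v : Int) => match st with
            | (out, i) => (if 0 < v then out.push i else out, i + 1)) (#[], 0)).1.toList
      = altIdx (dense.map (fun x => decide (x ≠ 0))) 0 true := by
    rw [← Array.foldl_toList, arrayFold_toList]
    have hcompr := foldl_enumFilter (fun v : Int => decide (0 < v))
      (dense.foldl stepA [(1 : Int)]) #[] 0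
    simp only [decide_eq_true_eq] at hcompr
    rw [show (#[(1 : Int)] : Array Int).toList = [(1 : Int)] from rfl]
    rw [hcompr]
    have := A_main dense [(1 : Int)] 1 (by rfl) (Or.inl rfl)
    simpa [posIdx] using this
  -- B side: the port computes altIdx of member
  have hflips : ((member.foldl (fun (st : Array Int × Int) m => match st with
        | (out, i) => (if m then out.push i else out, i + 1)) (#[], 0)).1).toList
      = flipsF member 0 := by
    rw [foldl_enumFilter (fun m : Bool => m) member #[] 0]
    rfl
  rw [hA, ← hmem, hflips]
  obtain ⟨h1, h2⟩ := emitFold_toList (flipsF member 0) #[] 0 true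
  rw [show (#[] : Array Int).toList = [] from rfl] at h1 h2
  have hfin : finish ((flipsF member 0).foldl stepB ([], 0, true)) N = altIdx member 0 true := by
    have hlen0 : (0 : Int) + (member.length : Int) = N := by omega
    have := B_main member 0 0 true [] (le_refl 0)
    rw [hlen0] at this
    simpa [PySem.List.pyRange_one_eq_nil (le_refl (0 : Int))] using this
  rw [← hfin]
  unfold finish
  rw [h2]
  split_ifs with hc
  · rw [foldl_push_toList, h1]
  · exact h1.symm
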